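-- pv_equiv track=rewrite | github.com/odormond/adventofcode | 2025/7/seven.py | part2
-- ===== SOURCE A (Python) =====
-- def parse(data):
--     lines = data.splitlines()
--     return {
--         (l, c) for l, line in enumerate(lines) for c, v in enumerate(line) if v == "^"
--     }, next(c for c, v in enumerate(lines[0]) if v == "S"), len(lines)
--
-- def part2(data):
--     splitters, start, height = parse(data)
--     beams = {start: 1}
--     for l in range(height):
--         new_beams = {}
--         for c, timelines in beams.items():
--             if (l, c) in splitters:
--                 new_beams[c - 1] = new_beams.get(c - 1, 0) + timelines
--                 new_beams[c + 1] = new_beams.get(c + 1, 0) + timelines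
--             else:
--                 new_beams[c] = new_beams.get(c, 0) + timelines
--         beams = new_beams
--     return sum(beams.values())
-- ===== SOURCE B (Python) =====
-- def part2(data):
--     lines = data.splitlines()
--     splitters = {
--         (l, c) for l, line in enumerate(lines) for c, v in enumerate(line) if v == "^"
--     }
--     start = next(c for c, v in enumerate(lines[0]) if v == "S")
--     height = len(lines)
--     # backward DP: ways[c] = number of timelines from (l, c) to below the grid
--     ways = {c: 1 for c in range(start - height, start + height + 1)}
--     for l in range(height - 1, -1, -1):
--         ways = {c: ways[c - 1] + ways[c + 1] if (l, c) in splitters else ways[c]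
--                 for c in range(start - l, start + l + 1)}
--     return ways[start]
-- ===== Notes on version B (the rewrite author's own statement) =====
-- stated objective: alternative
-- what changed: Replaces A's forward sparse-dict propagation (beams keyed by column, pushed down row by row, then summed) by a backward dense DP: iterate rows from the bottom up, maintaining for each column in the reachable triangle the number of timelines from that cell to below the grid, and return the entry at the start column.
import Mathlib
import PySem

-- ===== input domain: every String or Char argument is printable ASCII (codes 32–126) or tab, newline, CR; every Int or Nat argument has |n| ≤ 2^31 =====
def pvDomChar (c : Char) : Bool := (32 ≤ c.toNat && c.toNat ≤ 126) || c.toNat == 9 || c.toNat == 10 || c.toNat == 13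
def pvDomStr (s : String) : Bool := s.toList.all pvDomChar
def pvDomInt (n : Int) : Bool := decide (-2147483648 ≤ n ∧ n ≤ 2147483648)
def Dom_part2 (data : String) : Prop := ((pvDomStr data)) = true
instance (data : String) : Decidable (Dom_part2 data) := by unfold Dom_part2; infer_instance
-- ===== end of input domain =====

-- B replaces A's forward sparse-dict beam propagation by a backward dense DP over the
-- reachable column triangle (objective: alternative decomposition, similar cost).

-- ===== PORT A =====

-- helper: next(c for c, v in enumerate(lines[0]) if v == "S"); the 0 default is the
-- StopIteration case, excluded by Pre_part2
def pvFirstS : List (Int × Char) → Int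
  | [] => 0
  | (c, v) :: rest => if v == 'S' then c else pvFirstS rest

-- helper: the set comprehension in parse
def pvSplitters (lines : List String) : PySem.Set (Int × Int) :=
  (PySem.List.enumerate lines 0).foldl (fun s lp =>
    (PySem.List.enumerate lp.2.toList 0).foldl (fun s cp =>
      if cp.2 == '^' then PySem.Set.add s (lp.1, cp.1) else s) s) PySem.Set.empty

-- parse(data) as the helper it is in A (lines[0] on [] raises IndexError: excluded by Pre_part2)
def pvParse (data : String) : PySem.Set (Int × Int) × Int × Int :=
  let lines := PySem.Str.splitlines data
  (pvSplitters lines, pvFirstS (PySem.List.enumerate (lines.headD "").toList 0),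
   (lines.length : Int))

def part2 (data : String) : Int :=
  let p := pvParse data
  let splitters := p.1
  let start := p.2.1
  let height := p.2.2
  let beams : PySem.Dict Int Int := PySem.Dict.empty.insert start 1
  let beams := (PySem.List.pyRange 0 height 1).foldl (fun beams l =>
    beams.items.foldl (fun nb q =>
      if PySem.Set.contains splitters (l, q.1) then
        let nb := nb.insert (q.1 - 1) (nb.getD (q.1 - 1) 0 + q.2)
        nb.insert (q.1 + 1) (nb.getD (q.1 + 1) 0 + q.2)
      else
        nb.insert q.1 (nb.getD q.1 0 + q.2)) PySem.Dict.empty) beams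
  beams.values.sum

-- ===== PORT B =====

def part2_alt (data : String) : Int :=
  let lines := PySem.Str.splitlines data
  let splitters := pvSplitters lines
  let start := pvFirstS (PySem.List.enumerate (lines.headD "").toList 0)
  let height : Int := (lines.length : Int)
  -- backward DP: ways[c] = number of timelines from (l, c) to below the grid
  let ways : PySem.Dict Int Int :=
    (PySem.List.pyRange (start - height) (start + height + 1) 1).foldl
      (fun d c => d.insert c 1) PySem.Dict.empty
  let ways := (PySem.List.pyRange (height - 1) (-1) (-1)).foldl (fun w l =>
    (PySem.List.pyRange (start - l) (start + l + 1) 1).foldl (fun nw c =>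
      nw.insert c (if PySem.Set.contains splitters (l, c)
                   then w.getD (c - 1) 0 + w.getD (c + 1) 0
                   else w.getD c 0)) PySem.Dict.empty) ways
  -- ways[start]: the key start is always in range(start - l, start + l + 1), so getD is exact
  ways.getD start 0

-- ===== PRECONDITION & SPEC =====
-- Pre_ excludes exactly the inputs where the Python raises: no line at all (lines[0] is an
-- IndexError) or no 'S' in the first line (the generator's next raises StopIteration).
def Pre_part2 (data : String) : Prop :=
  PySem.Str.splitlines data ≠ [] ∧ 'S' ∈ ((PySem.Str.splitlines data).headD "").toList
instance (data : String) : Decidable (Pre_part2 data) := by unfold Pre_part2; infer_instance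

def pvWitness_part2 : String := ".S.\n.^.\n..."

def Spec_part2 (data : String) (out : Int) : Prop := out = part2_alt data
instance (data : String) (out : Int) : Decidable (Spec_part2 data out) := by unfold Spec_part2; infer_instance

-- ===== CLAIM (what is proved, stated in full; the proofs are below) =====
def Claim_equal_part2 : Prop := ∀ (data : String), Dom_part2 data → Pre_part2 data → Spec_part2 data (part2 data)

-- ===== LEMMAS AND PROOFS =====

-- the ideal backward count: pvV spl h k c = number of timelines from cell (h - k, c)
def pvV (spl : PySem.Set (Int × Int)) (h : Nat) : Nat → Int → Int
  | 0, _ => 1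
  | k + 1, c =>
    if PySem.Set.contains spl ((h : Int) - ((k : Int) + 1), c)
    then pvV spl h k (c - 1) + pvV spl h k (c + 1)
    else pvV spl h k c

-- weighted sum of a dict's items
def pvWsum (w : Int → Int) (d : PySem.Dict Int Int) : Int :=
  (d.items.map (fun p => p.2 * w p.1)).sum

-- named copies of the loop bodies of the two ports (definitionally equal to the inline lambdas)
def pvAstep (spl : PySem.Set (Int × Int)) (l : Int) (nb : PySem.Dict Int Int)
    (q : Int × Int) : PySem.Dict Int Int :=
  if PySem.Set.contains spl (l, q.1) then
    let nb := nb.insert (q.1 - 1) (nb.getD (q.1 - 1) 0 + q.2)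
    nb.insert (q.1 + 1) (nb.getD (q.1 + 1) 0 + q.2)
  else
    nb.insert q.1 (nb.getD q.1 0 + q.2)

def pvArow (spl : PySem.Set (Int × Int)) (beams : PySem.Dict Int Int) (l : Int) :
    PySem.Dict Int Int :=
  beams.items.foldl (pvAstep spl l) PySem.Dict.empty

def pvBval (spl : PySem.Set (Int × Int)) (w : PySem.Dict Int Int) (l c : Int) : Int :=
  if PySem.Set.contains spl (l, c) then w.getD (c - 1) 0 + w.getD (c + 1) 0 else w.getD c 0

def pvBrow (spl : PySem.Set (Int × Int)) (start : Int) (w : PySem.Dict Int Int) (l : Int) :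
    PySem.Dict Int Int :=
  (PySem.List.pyRange (start - l) (start + l + 1) 1).foldl
    (fun nw c => nw.insert c (pvBval spl w l c)) PySem.Dict.empty

-- sum over a replaced-in-place items list (the contains-case of an additive insert)
lemma pv_map_sum_replace (w : Int → Int) (k v0 t : Int) :
    ∀ (L : List (Int × Int)), (L.map Prod.fst).Nodup → (k, v0) ∈ L →
    ((L.map (fun p => if p.1 == k then (k, v0 + t) else p)).map (fun p => p.2 * w p.1)).sum
      = (L.map (fun p => p.2 * w p.1)).sum + t * w k := by
  intro L
  induction L with
  | nil => intro _ h; simp at h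
  | cons a L ih =>
    intro hnd hmem
    simp only [List.map_cons, List.nodup_cons] at hnd ⊢
    rcases List.mem_cons.mp hmem with heq | hmem'
    · subst heq
      simp only [List.sum_cons, beq_self_eq_true, if_pos]
      have hrepl : L.map (fun p => if p.1 == k then (k, v0 + t) else p) = L := by
        calc L.map (fun p => if p.1 == k then (k, v0 + t) else p) = L.map id := by
              apply List.map_congr_left
              intro p hp
              have hne : p.1 ≠ k := by
                intro h
                have hm : p.1 ∈ L.map Prod.fst := List.mem_map_of_mem hp
                exact hnd.1 (h ▸ hm)
              simp [hne]
          _ = L := List.map_id L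
      rw [hrepl]
      ring
    · have hak : a.1 ≠ k := by
        intro h
        exact hnd.1 (h ▸ List.mem_map_of_mem hmem')
      simp only [List.sum_cons]
      rw [if_neg (by simp [hak])]
      rw [ih hnd.2 hmem']
      ring

-- weighted sum after an additive dict update d[k] = d.get(k, 0) + t
lemma pv_wsum_addG (w : Int → Int) (d : PySem.Dict Int Int) (hn : d.keys.Nodup) (k t : Int) :
    pvWsum w (d.insert k (d.getD k 0 + t)) = pvWsum w d + t * w k := by
  unfold pvWsum
  cases hc : d.contains k
  · rw [PySem.Dict.items_insert_of_not_contains d _ hc,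
      PySem.Dict.getD_of_not_contains d _ hc]
    simp only [List.map_append, List.sum_append, List.map_cons, List.map_nil,
      List.sum_cons, List.sum_nil]
    ring
  · have h1 : (d.get? k).isSome := by rw [← PySem.Dict.contains_eq_isSome_get?, hc]
    obtain ⟨v0, hv0⟩ := Option.isSome_iff_exists.mp h1
    have hgd : d.getD k 0 = v0 := PySem.Dict.getD_of_get?_eq_some d 0 hv0
    rw [hgd, PySem.Dict.items_insert_of_contains d _ hc]
    have hmem : (k, v0) ∈ d.items := PySem.Dict.mem_items_of_get?_eq_some d hv0
    exact pv_map_sum_replace w k v0 t d.items hn hmem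

lemma pv_nodup_astep (spl : PySem.Set (Int × Int)) (l : Int) (nb : PySem.Dict Int Int)
    (hn : nb.keys.Nodup) (q : Int × Int) : (pvAstep spl l nb q).keys.Nodup := by
  unfold pvAstep
  split
  · exact PySem.Dict.nodup_keys_insert _ _ _ (PySem.Dict.nodup_keys_insert _ _ _ hn)
  · exact PySem.Dict.nodup_keys_insert _ _ _ hn

lemma pv_nodup_inner (spl : PySem.Set (Int × Int)) (l : Int) :
    ∀ (L : List (Int × Int)) (nb : PySem.Dict Int Int), nb.keys.Nodup →
    (L.foldl (pvAstep spl l) nb).keys.Nodup := by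
  intro L
  induction L with
  | nil => intro nb hn; exact hn
  | cons q L ih =>
    intro nb hn
    exact ih _ (pv_nodup_astep spl l nb hn q)

lemma pv_wsum_inner (w : Int → Int) (spl : PySem.Set (Int × Int)) (l : Int) :
    ∀ (L : List (Int × Int)) (nb : PySem.Dict Int Int), nb.keys.Nodup →
    pvWsum w (L.foldl (pvAstep spl l) nb)
      = pvWsum w nb + (L.map (fun q =>
          if PySem.Set.contains spl (l, q.1)
          then q.2 * w (q.1 - 1) + q.2 * w (q.1 + 1)
          else q.2 * w q.1)).sum := by
  intro L
  induction L with
  | nil => intro nb _; simp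
  | cons q L ih =>
    intro nb hn
    simp only [List.foldl_cons, List.map_cons, List.sum_cons]
    rw [ih _ (pv_nodup_astep spl l nb hn q)]
    unfold pvAstep
    split
    · rw [pv_wsum_addG w _ (PySem.Dict.nodup_keys_insert _ _ _ hn) _ q.2,
        pv_wsum_addG w _ hn _ q.2]
      ring
    · rw [pv_wsum_addG w _ hn _ q.2]
      ring

-- A''s outer loop: the weighted-sum invariant
lemma pv_A_outer (spl : PySem.Set (Int × Int)) (st : Int) (h : Nat) :
    ∀ j : Nat, j ≤ h →
    ((PySem.List.pyRange 0 (j : Int) 1).foldl (pvArow spl)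
        (PySem.Dict.empty.insert st 1)).keys.Nodup ∧
    pvWsum (pvV spl h (h - j))
        ((PySem.List.pyRange 0 (j : Int) 1).foldl (pvArow spl) (PySem.Dict.empty.insert st 1))
      = pvV spl h h st := by
  intro j
  induction j with
  | zero =>
    intro _
    rw [PySem.List.pyRange_one_eq_nil (by norm_num)]
    simp only [List.foldl_nil, Nat.sub_zero]
    constructor
    · exact PySem.Dict.nodup_keys_insert _ _ _ PySem.Dict.nodup_keys_empty
    · unfold pvWsum
      rw [PySem.Dict.items_insert_of_not_contains _ _ (PySem.Dict.contains_empty st)]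
      simp [one_mul, show (PySem.Dict.empty : PySem.Dict Int Int).items = [] from rfl]
  | succ j ih =>
    intro hj1
    have hj : j ≤ h := by omega
    obtain ⟨ihn, ihw⟩ := ih hj
    have hcast : ((j + 1 : Nat) : Int) = (j : Int) + 1 := by push_cast; ring
    rw [hcast, PySem.List.pyRange_one_succ_right (by positivity), List.foldl_append]
    simp only [List.foldl_cons, List.foldl_nil]
    constructor
    · unfold pvArow
      exact pv_nodup_inner spl _ _ _ PySem.Dict.nodup_keys_empty
    · unfold pvArow
      rw [pv_wsum_inner _ spl _ _ _ PySem.Dict.nodup_keys_empty]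
      have hempty : pvWsum (pvV spl h (h - (j + 1))) PySem.Dict.empty = 0 := by
        unfold pvWsum
        simp [show (PySem.Dict.empty : PySem.Dict Int Int).items = [] from rfl]
      rw [hempty, zero_add]
      have hk1 : h - j = (h - (j + 1)) + 1 := by omega
      have hrow : (h : Int) - (((h - (j + 1) : Nat) : Int) + 1) = (j : Int) := by omega
      have hfun : ∀ q : Int × Int,
          (if PySem.Set.contains spl ((j : Int), q.1)
           then q.2 * pvV spl h (h - (j + 1)) (q.1 - 1) + q.2 * pvV spl h (h - (j + 1)) (q.1 + 1)
           else q.2 * pvV spl h (h - (j + 1)) q.1)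
          = q.2 * pvV spl h (h - j) q.1 := by
        intro q
        rw [hk1, pvV, hrow]
        split <;> ring
      rw [← ihw]
      unfold pvWsum
      exact congrArg List.sum (List.map_congr_left (fun q _ => hfun q))

-- lookup in a dict built by inserting f c over a range
lemma pv_getD_range_insert (f : Int → Int) (hi : Int) :
    ∀ (n : Nat) (lo : Int) (d0 : PySem.Dict Int Int) (c : Int), (hi - lo).toNat = n →
    ((PySem.List.pyRange lo hi 1).foldl (fun d c => d.insert c (f c)) d0).getD c 0
      = if lo ≤ c ∧ c < hi then f c else d0.getD c 0 := by
  intro n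
  induction n with
  | zero =>
    intro lo d0 c hn
    rw [PySem.List.pyRange_one_eq_nil (by omega)]
    rw [if_neg (by omega)]
    rfl
  | succ n ih =>
    intro lo d0 c hn
    rw [PySem.List.pyRange_one_cons (by omega)]
    simp only [List.foldl_cons]
    rw [ih (lo + 1) _ c (by omega), PySem.Dict.getD_insert]
    split_ifs with h1 h2 h3 h4 h5 <;> try rfl
    · omega
    · subst h3; rfl
    · omega
    · omega

-- B''s backward loop invariant
lemma pv_B_loop (spl : PySem.Set (Int × Int)) (st : Int) (h : Nat) :
    ∀ j : Nat, j ≤ h → ∀ w : PySem.Dict Int Int,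
    (∀ c : Int, st - (j : Int) ≤ c → c ≤ st + (j : Int) → w.getD c 0 = pvV spl h (h - j) c) →
    (((PySem.List.pyRange ((j : Int) - 1) (-1) (-1)).foldl (pvBrow spl st) w).getD st 0)
      = pvV spl h h st := by
  intro j
  induction j with
  | zero =>
    intro _ w hw
    rw [PySem.List.pyRange_neg_one_eq_nil (by norm_num)]
    simp only [List.foldl_nil]
    have := hw st (by simp) (by simp)
    rwa [Nat.sub_zero] at this
  | succ j ih =>
    intro hj1 w hw
    have hj : j ≤ h := by omega
    have hcast : ((j + 1 : Nat) : Int) - 1 = (j : Int) := by push_cast; ring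
    rw [hcast, PySem.List.pyRange_neg_one_cons (by omega)]
    simp only [List.foldl_cons]
    apply ih hj
    intro c hc1 hc2
    unfold pvBrow
    rw [pv_getD_range_insert (pvBval spl w (j : Int)) (st + (j : Int) + 1)
      ((st + (j : Int) + 1) - (st - (j : Int))).toNat (st - (j : Int)) _ c rfl]
    have hb : ((j + 1 : Nat) : Int) = (j : Int) + 1 := by push_cast; ring
    rw [hb] at hw
    rw [if_pos (by omega)]
    unfold pvBval
    have hk1 : h - j = (h - (j + 1)) + 1 := by omega
    have hrow : (h : Int) - (((h - (j + 1) : Nat) : Int) + 1) = (j : Int) := by omega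
    rw [hk1, pvV, hrow]
    split
    · rw [hw (c - 1) (by omega) (by omega), hw (c + 1) (by omega) (by omega)]
    · rw [hw c (by omega) (by omega)]

lemma pv_A_result (spl : PySem.Set (Int × Int)) (st : Int) (h : Nat) :
    ((PySem.List.pyRange 0 (h : Int) 1).foldl (pvArow spl)
        (PySem.Dict.empty.insert st 1)).values.sum = pvV spl h h st := by
  have hw := (pv_A_outer spl st h h le_rfl).2
  rw [Nat.sub_self] at hw
  unfold pvWsum at hw
  have h0 : ∀ c : Int, pvV spl h 0 c = 1 := fun _ => rfl
  simp only [h0, mul_one] at hw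
  exact hw

lemma pv_B_result (spl : PySem.Set (Int × Int)) (st : Int) (h : Nat) :
    (((PySem.List.pyRange ((h : Int) - 1) (-1) (-1)).foldl (pvBrow spl st)
        ((PySem.List.pyRange (st - (h : Int)) (st + (h : Int) + 1) 1).foldl
          (fun d c => d.insert c 1) PySem.Dict.empty)).getD st 0)
      = pvV spl h h st := by
  apply pv_B_loop spl st h h le_rfl
  intro c hc1 hc2
  rw [pv_getD_range_insert (fun _ => (1 : Int)) (st + (h : Int) + 1)
    ((st + (h : Int) + 1) - (st - (h : Int))).toNat (st - (h : Int)) _ c rfl]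
  rw [if_pos (by omega), Nat.sub_self]
  rfl

-- ===== VERDICT (by name: the statement is the Claim_ definition above) =====
theorem part2_spec : Claim_equal_part2 := by
  intro data _ _
  show part2 data = part2_alt data
  show ((PySem.List.pyRange 0 ((PySem.Str.splitlines data).length : Int) 1).foldl
      (pvArow (pvSplitters (PySem.Str.splitlines data)))
      (PySem.Dict.empty.insert
        (pvFirstS (PySem.List.enumerate ((PySem.Str.splitlines data).headD "").toList 0)) 1)).values.sum
    = _
  rw [pv_A_result]
  exact (pv_B_result _ _ _).symm
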